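-- pv_equiv track=rewrite | github.com/ZoeChengYu/python | Dec0128.py | laplus
-- ===== SOURCE A (Python) =====
-- def laplus(data,lists):
--     ghost=[[(0*i) for i in range(len(data[j]))]for j in range(len(data))]
--     for i in range(len(data)):
--         for j in range(len(data[i])):
--             if data[i][j] in lists:
--                 ghost[i][j]=1
--     line=linecount(ghost)
--     mix=[[(int(data[i][j])*ghost[i][j])for j in range(len(data[i]))]for i in range(len(data))]
--     return line
--
-- def linecount(ghost):
--     line=0
--     positive=1
--     nagetive=1
--     for i in range(len(ghost)):
--         row=1
--         column=1
--         for j in range(len(ghost[i])):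
--             row*=ghost[i][j]
--             column*=ghost[j][i]
--         line+=(row+column)
--         positive*=ghost[i][i]
--         nagetive*=ghost[i][-i-1]
--     line+=(positive+nagetive)
--     return line
-- ===== SOURCE B (Python) =====
-- def laplus(data, lists):
--     n = len(data)
--     count = 0
--     for i in range(n):
--         if all(x in lists for x in data[i]):
--             count += 1
--         if all(data[j][i] in lists for j in range(n)):
--             count += 1
--     if all(data[i][i] in lists for i in range(n)):
--         count += 1
--     if all(data[i][n - 1 - i] in lists for i in range(n)):
--         count += 1
--     return count
-- ===== Notes on version B (the rewrite author's own statement) =====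
-- stated objective: faster
-- what changed: B drops A's materialized 0/1 indicator matrix and the discarded 'mix' product matrix and replaces the row/column/diagonal products by direct short-circuiting all-elements-match tests, so failing rows/columns stop at the first non-member instead of multiplying n indicators.
import Mathlib
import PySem

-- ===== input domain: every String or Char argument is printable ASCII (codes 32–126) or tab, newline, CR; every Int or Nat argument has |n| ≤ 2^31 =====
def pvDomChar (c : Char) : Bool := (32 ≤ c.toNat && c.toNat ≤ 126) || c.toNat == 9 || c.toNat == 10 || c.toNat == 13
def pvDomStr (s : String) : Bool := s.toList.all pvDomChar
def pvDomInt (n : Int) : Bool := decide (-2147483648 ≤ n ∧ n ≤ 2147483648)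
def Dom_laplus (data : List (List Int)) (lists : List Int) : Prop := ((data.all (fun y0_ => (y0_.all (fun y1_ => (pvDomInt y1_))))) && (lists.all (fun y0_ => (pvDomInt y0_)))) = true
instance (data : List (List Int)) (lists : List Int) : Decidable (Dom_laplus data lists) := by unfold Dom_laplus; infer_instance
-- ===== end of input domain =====

-- B replaces A's materialized 0/1 indicator matrix (and the discarded 'mix' matrix) and its
-- row/column/diagonal products by directly counting rows/columns/diagonals all of whose
-- elements pass the membership test; proved equal on square matrices (Pre_).


-- ===== PORT A =====
-- helper 'linecount' of A, transliterated
def linecountA (ghost : List (List Int)) : Int :=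
  let s := (PySem.List.pyRange 0 ghost.length 1).foldl (fun (s : Int × Int × Int) i =>
    let rc := (PySem.List.pyRange 0 ((PySem.List.pyGetD ghost i []).length) 1).foldl
      (fun (rc : Int × Int) j =>
        (rc.1 * PySem.List.pyGetD (PySem.List.pyGetD ghost i []) j 0,
         rc.2 * PySem.List.pyGetD (PySem.List.pyGetD ghost j []) i 0)) (1, 1)
    (s.1 + (rc.1 + rc.2),
     s.2.1 * PySem.List.pyGetD (PySem.List.pyGetD ghost i []) i 0,
     s.2.2 * PySem.List.pyGetD (PySem.List.pyGetD ghost i []) (-i - 1) 0))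
    (0, 1, 1)
  s.1 + (s.2.1 + s.2.2)

def laplus (data : List (List Int)) (lists : List Int) : Int :=
  let ghost0 : List (List Int) := (PySem.List.pyRange 0 data.length 1).map (fun j =>
    (PySem.List.pyRange 0 ((PySem.List.pyGetD data j []).length) 1).map (fun i => 0 * i))
  let ghost := (PySem.List.pyRange 0 data.length 1).foldl (fun g i =>
    (PySem.List.pyRange 0 ((PySem.List.pyGetD data i []).length) 1).foldl (fun g j =>
      if PySem.List.pyGetD (PySem.List.pyGetD data i []) j 0 ∈ lists then
        PySem.List.pySetD g i (PySem.List.pySetD (PySem.List.pyGetD g i []) j 1)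
      else g) g) ghost0
  let line := linecountA ghost
  -- 'mix' is computed and discarded by A; kept for faithfulness
  let _mix := (PySem.List.pyRange 0 data.length 1).map (fun i =>
    (PySem.List.pyRange 0 ((PySem.List.pyGetD data i []).length) 1).map (fun j =>
      PySem.List.pyGetD (PySem.List.pyGetD data i []) j 0 *
      PySem.List.pyGetD (PySem.List.pyGetD ghost i []) j 0))
  line

-- ===== PORT B =====
def laplus_alt (data : List (List Int)) (lists : List Int) : Int :=
  let n := data.length
  let count := (List.range n).foldl (fun (c : Int) i =>
    let c := if (data.getD i []).all (fun x => x ∈ lists) then c + 1 else c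
    if (List.range n).all (fun j => (data.getD j []).getD i 0 ∈ lists) then c + 1 else c) 0
  let count := if (List.range n).all (fun i => (data.getD i []).getD i 0 ∈ lists) then count + 1 else count
  if (List.range n).all (fun i => (data.getD i []).getD (n - 1 - i) 0 ∈ lists) then count + 1 else count

-- ===== PRECONDITION & SPEC =====
-- Pre_: square matrices only — A raises IndexError on every non-square input
-- (column access ghost[j][i] or diagonal access ghost[i][i] / ghost[i][-i-1] goes out of range).
def Pre_laplus (data : List (List Int)) (lists : List Int) : Prop :=
  ∀ row ∈ data, row.length = data.length
instance (data : List (List Int)) (lists : List Int) : Decidable (Pre_laplus data lists) := by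
  unfold Pre_laplus; infer_instance
def pvWitness_laplus : List (List Int) × List Int := ([[1, 2], [3, 4]], [1, 4])

def Spec_laplus (data : List (List Int)) (lists : List Int) (out : Int) : Prop := out = laplus_alt data lists
instance (data : List (List Int)) (lists : List Int) (out : Int) : Decidable (Spec_laplus data lists out) := by unfold Spec_laplus; infer_instance

-- ===== CLAIM (what is proved, stated in full; the proofs are below) =====
def Claim_equal_laplus : Prop := ∀ (data : List (List Int)) (lists : List Int), Dom_laplus data lists → Pre_laplus data lists → Spec_laplus data lists (laplus data lists)

-- ===== LEMMAS AND PROOFS =====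

-- membership indicator and indicator row (proof-only helpers)
def pvInd (lists : List Int) (x : Int) : Int := if x ∈ lists then 1 else 0
def pvIndRow (lists : List Int) (row : List Int) : List Int := row.map (pvInd lists)

-- the inner assignment loop of A touches only row i
lemma inner_set_row (l : List Int) (i : Nat) (g : List (List Int)) (hi : i < g.length)
    (P : Int → Prop) [DecidablePred P] :
    l.foldl (fun g j => if P j then
        PySem.List.pySetD g (i : Int) (PySem.List.pySetD (PySem.List.pyGetD g (i : Int) []) j 1)
      else g) g
    = g.set i (l.foldl (fun r j => if P j then PySem.List.pySetD r j 1 else r) (g.getD i [])) := by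
  induction l generalizing g with
  | nil =>
      simp only [List.foldl_nil]
      rw [List.getD_eq_getElem _ _ hi, List.set_getElem_self]
  | cons j l ih =>
      simp only [List.foldl_cons]
      by_cases h : P j
      · rw [if_pos h, if_pos h,
          ih _ (by simp [hi])]
        simp only [PySem.List.pySetD_natCast, PySem.List.pyGetD_natCast, List.set_set]
        have hgd : ∀ R0 : List Int, (g.set i R0).getD i [] = R0 := by
          intro R0
          rw [List.getD_eq_getElem _ _ (by simpa using hi)]
          simp
        rw [hgd]
      · rw [if_neg h, if_neg h, ih _ hi]

-- the row-update loop turns the zero row into the indicator row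
lemma row_fold_aux (lists : List Int) (row : List Int) (k : Nat) (hk : k ≤ row.length) :
    (PySem.List.pyRange 0 (k : Int) 1).foldl
      (fun r j => if PySem.List.pyGetD row j 0 ∈ lists then PySem.List.pySetD r j 1 else r)
      (row.map (fun _ => (0 : Int)))
    = (row.take k).map (pvInd lists) ++ (row.drop k).map (fun _ => (0 : Int)) := by
  induction k with
  | zero => simp
  | succ k ih =>
      have hk' : k < row.length := by omega
      have : ((k + 1 : Nat) : Int) = (k : Int) + 1 := by push_cast; ring
      rw [this, PySem.List.pyRange_one_succ_right (by positivity), List.foldl_append,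
        ih (by omega)]
      simp only [List.foldl_cons, List.foldl_nil, PySem.List.pyGetD_natCast,
        PySem.List.pySetD_natCast]
      rw [List.getD_eq_getElem _ _ hk', List.take_add_one, List.drop_eq_getElem_cons hk',
        List.getElem?_eq_getElem hk']
      by_cases h : row[k] ∈ lists
      · rw [if_pos h, List.set_append]
        simp [Nat.min_eq_left (le_of_lt hk')]
        rw [show row.length - k = (row.length - (k + 1)) + 1 from by omega,
          List.replicate_succ, List.set_cons_zero, List.take_add_one,
          List.getElem?_map, List.getElem?_eq_getElem hk']
        simp [pvInd, h]
      · rw [if_neg h]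
        simp
        rw [show row.length - k = (row.length - (k + 1)) + 1 from by omega,
          List.replicate_succ, List.take_add_one,
          List.getElem?_map, List.getElem?_eq_getElem hk']
        simp [pvInd, h]

lemma row_fold (lists : List Int) (row : List Int) :
    (PySem.List.pyRange 0 (row.length : Int) 1).foldl
      (fun r j => if PySem.List.pyGetD row j 0 ∈ lists then PySem.List.pySetD r j 1 else r)
      (row.map (fun _ => (0 : Int)))
    = pvIndRow lists row := by
  simpa [pvIndRow] using row_fold_aux lists row row.length le_rfl

-- A's assignment loops build the indicator matrix
lemma ghost_outer (data : List (List Int)) (lists : List Int) (k : Nat) (hk : k ≤ data.length) :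
    (List.range k).foldl (fun g (i : Nat) =>
      (PySem.List.pyRange 0 (((PySem.List.pyGetD data (i : Int) []).length : Int)) 1).foldl
        (fun g j => if PySem.List.pyGetD (PySem.List.pyGetD data (i : Int) []) j 0 ∈ lists then
            PySem.List.pySetD g (i : Int) (PySem.List.pySetD (PySem.List.pyGetD g (i : Int) []) j 1)
          else g) g)
      (data.map (fun row => row.map (fun _ => (0 : Int))))
    = (data.take k).map (pvIndRow lists) ++ (data.drop k).map (fun row => row.map (fun _ => (0 : Int))) := by
  induction k with
  | zero => simp
  | succ k ih =>
      have hk' : k < data.length := by omega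
      rw [List.range_succ, List.foldl_append, ih (by omega)]
      simp only [List.foldl_cons, List.foldl_nil]
      have hlen : ((data.take k).map (pvIndRow lists) ++
          (data.drop k).map (fun row => row.map (fun _ => (0 : Int)))).length = data.length := by
        simp; omega
      rw [inner_set_row _ k _ (by rw [hlen]; exact hk')]
      have hget : ((data.take k).map (pvIndRow lists) ++
          (data.drop k).map (fun row => row.map (fun _ => (0 : Int)))).getD k []
          = data[k].map (fun _ => (0 : Int)) := by
        rw [List.getD_eq_getElem _ _ (by rw [hlen]; exact hk'),
          List.getElem_append_right (by simp [Nat.min_eq_left (le_of_lt hk')])]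
        simp only [List.length_map, List.length_take, Nat.min_eq_left (le_of_lt hk'),
          Nat.sub_self, List.getElem_map, List.getElem_drop]
        simp
      rw [hget]
      have hrow : PySem.List.pyGetD data (k : Int) [] = data[k] := by
        rw [PySem.List.pyGetD_natCast, List.getD_eq_getElem _ _ hk']
      rw [hrow, row_fold lists data[k]]
      rw [List.set_append]
      simp only [List.length_map, List.length_take, Nat.min_eq_left (le_of_lt hk'),
        lt_irrefl, Nat.sub_self]
      rw [if_neg (by simp), List.drop_eq_getElem_cons hk', List.map_cons, List.set_cons_zero]
      have htake : (data.map (pvIndRow lists)).take (k + 1)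
          = (data.map (pvIndRow lists)).take k ++ [pvIndRow lists data[k]] := by
        rw [List.take_add_one, List.getElem?_map, List.getElem?_eq_getElem hk']
        simp
      simp [htake]

lemma ghost0_eq (data : List (List Int)) :
    (PySem.List.pyRange 0 (data.length : Int) 1).map (fun j =>
      (PySem.List.pyRange 0 (((PySem.List.pyGetD data j []).length : Int)) 1).map (fun i => 0 * i))
    = data.map (fun row => row.map (fun _ => (0 : Int))) := by
  rw [PySem.List.pyRange_zero_nat, List.map_map]
  apply List.ext_getElem (by simp)
  intro k h1 h2
  simp only [List.getElem_map, List.getElem_range, Function.comp_apply]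
  rw [PySem.List.pyGetD_natCast, List.getD_eq_getElem _ _ (by simpa using h2)]
  rw [PySem.List.pyRange_zero_nat, List.map_map]
  apply List.ext_getElem (by simp)
  intro m hm1 hm2
  simp

-- full characterisation of A's ghost matrix
lemma ghost_eq (data : List (List Int)) (lists : List Int) :
    (PySem.List.pyRange 0 (data.length : Int) 1).foldl (fun g i =>
      (PySem.List.pyRange 0 (((PySem.List.pyGetD data i []).length : Int)) 1).foldl
        (fun g j => if PySem.List.pyGetD (PySem.List.pyGetD data i []) j 0 ∈ lists then
            PySem.List.pySetD g i (PySem.List.pySetD (PySem.List.pyGetD g i []) j 1)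
          else g) g)
      ((PySem.List.pyRange 0 (data.length : Int) 1).map (fun j =>
        (PySem.List.pyRange 0 (((PySem.List.pyGetD data j []).length : Int)) 1).map (fun i => 0 * i)))
    = data.map (pvIndRow lists) := by
  rw [ghost0_eq]
  rw [PySem.List.pyRange_zero_nat data.length, List.foldl_map]
  simpa using ghost_outer data lists data.length le_rfl

-- product of 0/1 indicators is the all-indicator
lemma foldl_mul_ind {α : Type} (lists : List Int) (f : α → Int) (l : List α) (a : Int) :
    l.foldl (fun acc x => acc * pvInd lists (f x)) a
    = a * (if l.all (fun x => decide (f x ∈ lists)) then 1 else 0) := by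
  induction l generalizing a with
  | nil => simp
  | cons x l ih =>
      rw [List.foldl_cons, ih]
      by_cases h : f x ∈ lists <;> simp [pvInd, h]

-- an all over range-indexed getD is an all over the list
lemma all_range_getD (data : List (List Int)) (p : List Int → Bool) :
    (List.range data.length).all (fun j => p (data.getD j [])) = data.all p := by
  rw [Bool.eq_iff_iff]
  simp only [List.all_eq_true, List.mem_range]
  constructor
  · intro h x hx
    obtain ⟨j, hj, rfl⟩ := List.mem_iff_getElem.mp hx
    have := h j hj
    rwa [List.getD_eq_getElem _ _ hj] at this
  · intro h j hj
    rw [List.getD_eq_getElem _ _ hj]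
    exact h _ (List.getElem_mem hj)

-- linecount on the indicator matrix is B's count
lemma linecount_eq (data : List (List Int)) (lists : List Int)
    (hsq : ∀ row ∈ data, row.length = data.length) :
    linecountA (data.map (pvIndRow lists)) = laplus_alt data lists := by
  unfold linecountA laplus_alt
  simp only [List.length_map]
  rw [PySem.List.pyRange_zero_nat, List.foldl_map]
  rw [PySem.List.foldl_congr_mem _ _
      (fun (s : Int × Int × Int) (i : Nat) =>
        (s.1 + ((if (data.getD i []).all (fun x => decide (x ∈ lists)) then (1 : Int) else 0)
              + (if (List.range data.length).all (fun j => decide ((data.getD j []).getD i 0 ∈ lists)) then (1 : Int) else 0)),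
         s.2.1 * pvInd lists ((data.getD i []).getD i 0),
         s.2.2 * pvInd lists ((data.getD i []).getD (data.length - 1 - i) 0))) _
      (by
        intro acc i hi
        rw [List.mem_range] at hi
        have hmem : data.getD i [] ∈ data := by
          rw [List.getD_eq_getElem _ _ hi]; exact List.getElem_mem hi
        have hrowlen : (data.getD i []).length = data.length := hsq _ hmem
        have hgi : PySem.List.pyGetD (data.map (pvIndRow lists)) (i : Int) []
            = pvIndRow lists (data.getD i []) := by
          rw [PySem.List.pyGetD_natCast,
            List.getD_eq_getElem _ _ (by simpa using hi), List.getElem_map,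
            List.getD_eq_getElem _ _ hi]
        simp only [hgi]
        rw [PySem.List.foldl_prod_mk
          (f := fun (a : Int) (j : Int) => a * PySem.List.pyGetD (pvIndRow lists (data.getD i [])) j 0)
          (g := fun (a : Int) (j : Int) => a * PySem.List.pyGetD (PySem.List.pyGetD (data.map (pvIndRow lists)) j []) (i : Int) 0)]
        have hcol : ∀ (a : Int) (row : List Int), row ∈ data →
            a * PySem.List.pyGetD (pvIndRow lists row) (i : Int) 0
            = a * pvInd lists (row.getD i 0) := by
          intro a row hrow
          have hrl : row.length = data.length := hsq _ hrow
          rw [PySem.List.pyGetD_natCast,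
            List.getD_eq_getElem _ _ (by simp [pvIndRow, hrl, hi])]
          simp only [pvIndRow, List.getElem_map]
          rw [List.getD_eq_getElem _ _ (by omega)]
        have h1 : (PySem.List.pyRange 0 ((pvIndRow lists (data.getD i [])).length : Int)).foldl
            (fun (a : Int) (j : Int) => a * PySem.List.pyGetD (pvIndRow lists (data.getD i [])) j 0) 1
            = if (data.getD i []).all (fun x => decide (x ∈ lists)) then (1 : Int) else 0 := by
          rw [PySem.List.foldl_pyRange_zero_pyGetD' (pvIndRow lists (data.getD i [])) 0
            (fun (a : Int) (x : Int) => a * x) 1]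
          unfold pvIndRow
          rw [List.foldl_map, foldl_mul_ind lists (fun x : Int => x), one_mul]
        have hb : ((pvIndRow lists (data.getD i [])).length : Int)
            = ((data.map (pvIndRow lists)).length : Int) := by
          simp only [pvIndRow, List.length_map, hrowlen]
        have h2 : (PySem.List.pyRange 0 ((pvIndRow lists (data.getD i [])).length : Int)).foldl
            (fun (a : Int) (j : Int) => a * PySem.List.pyGetD (PySem.List.pyGetD (data.map (pvIndRow lists)) j []) (i : Int) 0) 1
            = if (List.range data.length).all (fun j => decide ((data.getD j []).getD i 0 ∈ lists)) then (1 : Int) else 0 := by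
          rw [hb, PySem.List.foldl_pyRange_zero_pyGetD' (data.map (pvIndRow lists)) []
            (fun (a : Int) (r : List Int) => a * PySem.List.pyGetD r (i : Int) 0) 1]
          rw [List.foldl_map]
          rw [PySem.List.foldl_congr_mem data _
            (fun (a : Int) (row : List Int) => a * pvInd lists (row.getD i 0)) 1
            (by intro a row hrow; exact hcol a row hrow)]
          rw [foldl_mul_ind lists (fun row : List Int => row.getD i 0), one_mul,
            all_range_getD data (fun row => decide (row.getD i 0 ∈ lists))]
        have hdiag : PySem.List.pyGetD (pvIndRow lists (data.getD i [])) (i : Int) 0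
            = pvInd lists ((data.getD i []).getD i 0) := by
          have := hcol 1 (data.getD i []) hmem
          simpa using this
        have hanti : PySem.List.pyGetD (pvIndRow lists (data.getD i [])) (-(i : Int) - 1) 0
            = pvInd lists ((data.getD i []).getD (data.length - 1 - i) 0) := by
          have hcast : (-(i : Int) - 1) = -(((i + 1 : Nat)) : Int) := by push_cast; ring
          rw [hcast, PySem.List.pyGetD_neg_natCast _ _ _ (by omega)
            (show i + 1 ≤ (pvIndRow lists (data.getD i [])).length from by
              unfold pvIndRow; rw [List.length_map, hrowlen]; omega)]
          simp only [pvIndRow, List.length_map, List.getElem_map]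
          have hidx : (data.getD i []).length - (i + 1) = data.length - 1 - i := by omega
          simp only [hidx]
          rw [List.getD_eq_getElem _ _ (show data.length - 1 - i < (data.getD i []).length by omega)]
        simp only [h1, h2, hdiag, hanti])]
  rw [PySem.List.foldl_prod_mk
    (f := fun (a : Int) (i : Nat) => a + ((if (data.getD i []).all (fun x => decide (x ∈ lists)) then (1 : Int) else 0)
              + (if (List.range data.length).all (fun j => decide ((data.getD j []).getD i 0 ∈ lists)) then (1 : Int) else 0)))
    (g := fun (t : Int × Int) (i : Nat) =>
        (t.1 * pvInd lists ((data.getD i []).getD i 0),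
         t.2 * pvInd lists ((data.getD i []).getD (data.length - 1 - i) 0)))]
  rw [PySem.List.foldl_prod_mk
    (f := fun (a : Int) (i : Nat) => a * pvInd lists ((data.getD i []).getD i 0))
    (g := fun (a : Int) (i : Nat) => a * pvInd lists ((data.getD i []).getD (data.length - 1 - i) 0))]
  rw [PySem.List.foldl_add, foldl_mul_ind lists (fun i : Nat => (data.getD i []).getD i 0),
    foldl_mul_ind lists (fun i : Nat => (data.getD i []).getD (data.length - 1 - i) 0)]
  rw [PySem.List.foldl_congr_mem (List.range data.length) _
    (fun (c : Int) (i : Nat) =>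
      c + ((if (data.getD i []).all (fun x => decide (x ∈ lists)) then (1 : Int) else 0)
         + (if (List.range data.length).all (fun j => decide ((data.getD j []).getD i 0 ∈ lists)) then (1 : Int) else 0))) 0
    (by intro c i _; simp only []; split_ifs <;> ring)]
  rw [PySem.List.foldl_add]
  simp only []
  split_ifs <;> ring

-- ===== VERDICT (by name: the statement is the Claim_ definition above) =====
theorem laplus_spec : Claim_equal_laplus := by
  intro data lists _hdom hpre
  unfold Spec_laplus laplus
  simp only []
  rw [ghost_eq data lists]
  exact linecount_eq data lists hpre
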